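-- pv_equiv track=rewrite | github.com/robertssong7/tennis-analytics | evaluate.py | parse_shot_sequence
-- ===== SOURCE A (Python) =====
-- def parse_shot_sequence(seq: str) -> list:
--     """Parse Sackmann shot sequence string into shot type list."""
--     if not seq:
--         return []
--     shots = []
--     i = 0
--     while i < len(seq):
--         c = seq[i]
--         shot_type = None
--         if c in ("f", "F"):
--             direction = seq[i+1] if i+1 < len(seq) else ""
--             shot_type = "forehand_cross" if direction in ("2", "6") else "forehand_line"
--         elif c in ("b", "B"):
--             direction = seq[i+1] if i+1 < len(seq) else ""
--             shot_type = "backhand_cross" if direction in ("2", "6") else "backhand_line"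
--         elif c in ("r", "R"):
--             shot_type = "slice"
--         elif c in ("v", "V", "z", "Z"):
--             shot_type = "approach_volley"
--         if shot_type:
--             shots.append(shot_type)
--         i += 1
--     return shots
-- ===== SOURCE B (Python) =====
-- import re
--
-- _SHOT_RE = re.compile(r'([fF]|[bB])([26]?)|[rR]|[vVzZ]')
--
-- _FIXED = {'r': 'slice', 'v': 'approach_volley', 'z': 'approach_volley'}
--
--
-- def parse_shot_sequence(seq: str) -> list:
--     """Parse Sackmann shot sequence string into shot type list."""
--     shots = []
--     for m in _SHOT_RE.finditer(seq):
--         stroke = m.group(1)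
--         if stroke:
--             side = 'forehand' if stroke in 'fF' else 'backhand'
--             shots.append(side + ('_cross' if m.group(2) else '_line'))
--         else:
--             shots.append(_FIXED[m.group(0).lower()])
--     return shots
-- ===== Notes on version B (the rewrite author's own statement) =====
-- stated objective: idiomatic
-- what changed: Replaces A's manual index walk with per-character lookahead by a single compiled-regex finditer pass that tokenizes the sequence (consuming the optional direction digit with each stroke token) and maps each token to its shot name.
import Mathlib
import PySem

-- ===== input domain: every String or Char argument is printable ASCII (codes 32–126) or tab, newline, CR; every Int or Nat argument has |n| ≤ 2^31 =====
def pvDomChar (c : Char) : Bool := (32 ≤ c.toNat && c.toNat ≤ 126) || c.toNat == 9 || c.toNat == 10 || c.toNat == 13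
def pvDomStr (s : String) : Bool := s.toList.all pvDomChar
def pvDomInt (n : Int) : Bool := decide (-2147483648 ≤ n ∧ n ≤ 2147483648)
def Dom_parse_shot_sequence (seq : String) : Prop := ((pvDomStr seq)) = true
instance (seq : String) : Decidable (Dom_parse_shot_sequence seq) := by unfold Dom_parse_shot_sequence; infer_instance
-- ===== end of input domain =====

-- B replaces A's manual index walk with lookahead by a regex-style tokenizer
-- (one left-to-right finditer pass that consumes each token, including its
-- optional direction digit): objective 'idiomatic', same O(n) cost.

-- ===== PORT A =====
-- A's while loop over index i with lookahead seq[i+1]; each step advances by 1.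
def pvALoop (l : List Char) : List String :=
  match l with
  | [] => []
  | c :: rest =>
    let shot_type : Option String :=
      if c = 'f' ∨ c = 'F' then
        let direction := rest.head?
        some (if direction = some '2' ∨ direction = some '6' then "forehand_cross" else "forehand_line")
      else if c = 'b' ∨ c = 'B' then
        let direction := rest.head?
        some (if direction = some '2' ∨ direction = some '6' then "backhand_cross" else "backhand_line")
      else if c = 'r' ∨ c = 'R' then some "slice"
      else if c = 'v' ∨ c = 'V' ∨ c = 'z' ∨ c = 'Z' then some "approach_volley"
      else none
    (match shot_type with
     | some t => [t]
     | none => []) ++ pvALoop rest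

def parse_shot_sequence (seq : String) : List String :=
  if seq = "" then [] else pvALoop seq.toList

-- ===== PORT B =====
-- transcription of the regex ([fF]|[bB])([26]?)|[rR]|[vVzZ] applied by finditer:
-- at each position try the pattern (consuming the optional direction digit), else skip one char.
def pvBScan (l : List Char) : List String :=
  match l with
  | [] => []
  | c :: rest =>
    if c = 'f' ∨ c = 'F' ∨ c = 'b' ∨ c = 'B' then
      let side := if c = 'f' ∨ c = 'F' then "forehand" else "backhand"
      match rest with
      | d :: rest' =>
        if d = '2' ∨ d = '6' then (side ++ "_cross") :: pvBScan rest'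
        else (side ++ "_line") :: pvBScan (d :: rest')  -- rest = d :: rest'
      | [] => [side ++ "_line"]
    else if c = 'r' ∨ c = 'R' then "slice" :: pvBScan rest
    else if c = 'v' ∨ c = 'V' ∨ c = 'z' ∨ c = 'Z' then "approach_volley" :: pvBScan rest
    else pvBScan rest
termination_by l.length
decreasing_by all_goals simp

def parse_shot_sequence_alt (seq : String) : List String := pvBScan seq.toList

-- ===== PRECONDITION & SPEC =====
def Spec_parse_shot_sequence (seq : String) (out : List String) : Prop := out = parse_shot_sequence_alt seq
instance (seq : String) (out : List String) : Decidable (Spec_parse_shot_sequence seq out) := by unfold Spec_parse_shot_sequence; infer_instance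

-- ===== CLAIM (what is proved, stated in full; the proofs are below) =====
def Claim_equal_parse_shot_sequence : Prop := ∀ (seq : String), Dom_parse_shot_sequence seq → Spec_parse_shot_sequence seq (parse_shot_sequence seq)

-- ===== LEMMAS AND PROOFS =====
theorem pv_app_fl : ("forehand" : String) ++ "_line" = "forehand_line" := by decide
theorem pv_app_fc : ("forehand" : String) ++ "_cross" = "forehand_cross" := by decide
theorem pv_app_bl : ("backhand" : String) ++ "_line" = "backhand_line" := by decide
theorem pv_app_bc : ("backhand" : String) ++ "_cross" = "backhand_cross" := by decide

theorem pvALoop_eq_pvBScan (l : List Char) : pvALoop l = pvBScan l := by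
  match l with
  | [] => simp [pvALoop, pvBScan]
  | c :: rest =>
    by_cases hfb : c = 'f' ∨ c = 'F' ∨ c = 'b' ∨ c = 'B'
    · match rest with
      | [] =>
        rcases hfb with h | h | h | h <;> subst h <;>
          rw [pvBScan.eq_def] <;> simp [pvALoop, pv_app_fl, pv_app_bl]
      | d :: rest' =>
        by_cases hd : d = '2' ∨ d = '6'
        · have ih := pvALoop_eq_pvBScan rest'
          rcases hfb with h | h | h | h <;> subst h <;>
            rcases hd with hd | hd <;> subst hd <;>
            simp [pvALoop, pvBScan, ih, pv_app_fc, pv_app_bc]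
        · have ih := pvALoop_eq_pvBScan (d :: rest')
          rcases hfb with h | h | h | h <;> subst h <;>
            rw [pvBScan.eq_def] <;>
            simp [pvALoop, hd, pv_app_fl, pv_app_bl] <;>
            rw [← ih] <;> simp [pvALoop]
    · have ih := pvALoop_eq_pvBScan rest
      have h1 : ¬ (c = 'f' ∨ c = 'F') := fun h => hfb (by tauto)
      have h2 : ¬ (c = 'b' ∨ c = 'B') := fun h => hfb (by tauto)
      by_cases hr : c = 'r' ∨ c = 'R'
      · rcases hr with h | h <;> subst h <;> simp [pvALoop, pvBScan, ih]
      · by_cases hv : c = 'v' ∨ c = 'V' ∨ c = 'z' ∨ c = 'Z'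
        · rcases hv with h | h | h | h <;> subst h <;> simp [pvALoop, pvBScan, ih]
        · simp [pvALoop, pvBScan, h1, h2, hr, hv, ih]
termination_by l.length

-- ===== VERDICT (by name: the statement is the Claim_ definition above) =====
theorem parse_shot_sequence_spec : Claim_equal_parse_shot_sequence := by
  intro seq _
  unfold Spec_parse_shot_sequence parse_shot_sequence parse_shot_sequence_alt
  split
  · next h => subst h; simp [pvBScan]
  · exact pvALoop_eq_pvBScan _
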